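-- pv_equiv track=rewrite | github.com/bmi-labmedinfo/Epistemological_framework | computational_implementation/medical_reasoning_phases/ranking.py | summarize_evaluated_findings
-- ===== SOURCE A (Python) =====
-- def summarize_evaluated_findings(findings):
--     confirmed = []
--     contradicted = []
--     not_observed = []
--
--     for f in findings or []:
--         desc = f.get("description", "")
--         comm = f.get("comment", "")
--         line = f"- {desc}" + (f" :: {comm}" if comm else "")
--
--         st = (f.get("status") or "").lower()
--         if st == "confirmed":
--             confirmed.append(line)
--         elif st == "contradicted":
--             contradicted.append(line)
--         else:  # not_observed / unknown / other
--             not_observed.append(line)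
--
--     return confirmed, contradicted, not_observed
-- ===== SOURCE B (Python) =====
-- def summarize_evaluated_findings(findings):
--     def fmt(f):
--         desc = f.get("description", "")
--         comm = f.get("comment", "")
--         return f"- {desc}" + (f" :: {comm}" if comm else "")
--
--     tagged = [((f.get("status") or "").lower(), fmt(f)) for f in (findings or [])]
--     confirmed = [line for st, line in tagged if st == "confirmed"]
--     contradicted = [line for st, line in tagged if st == "contradicted"]
--     not_observed = [line for st, line in tagged
--                     if st not in ("confirmed", "contradicted")]
--     return confirmed, contradicted, not_observed
-- ===== Notes on version B (the rewrite author's own statement) =====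
-- stated objective: simpler
-- what changed: Replaced the single dispatching loop with three mutable accumulators by a map to (status, line) pairs followed by three independent filter comprehensions, one per bucket.
import Mathlib
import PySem

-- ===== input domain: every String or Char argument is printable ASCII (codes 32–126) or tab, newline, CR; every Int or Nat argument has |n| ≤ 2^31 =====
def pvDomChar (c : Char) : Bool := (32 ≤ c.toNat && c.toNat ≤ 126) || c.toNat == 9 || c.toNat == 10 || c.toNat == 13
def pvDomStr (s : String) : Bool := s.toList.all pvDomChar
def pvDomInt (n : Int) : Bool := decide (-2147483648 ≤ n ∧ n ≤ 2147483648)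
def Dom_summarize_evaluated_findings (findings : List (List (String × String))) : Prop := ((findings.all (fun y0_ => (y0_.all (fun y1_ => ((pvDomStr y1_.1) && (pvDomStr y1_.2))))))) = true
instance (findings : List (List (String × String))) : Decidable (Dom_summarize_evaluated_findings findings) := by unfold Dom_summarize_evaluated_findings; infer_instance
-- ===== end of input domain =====

-- B replaces A's single dispatching loop (three mutable accumulators) by a map to
-- (status, line) pairs followed by three independent filters; objective: simpler.

-- f.get(k, "") on an association-list dict: first match, default "" (exact: Python
-- dict lookup; duplicate keys cannot occur in a Python dict, first match is the convention)
def pvGetStr (f : List (String × String)) (k : String) : String :=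
  ((f.find? (fun p => p.1 == k)).map Prod.snd).getD ""

-- line = f"- {desc}" + (f" :: {comm}" if comm else "")
def pvLine (f : List (String × String)) : String :=
  let desc := pvGetStr f "description"
  let comm := pvGetStr f "comment"
  "- " ++ desc ++ (if comm ≠ "" then " :: " ++ comm else "")

-- st = (f.get("status") or "").lower()  ('or ""' maps both a missing key and "" to "")
def pvStatus (f : List (String × String)) : String :=
  PySem.Str.lower (pvGetStr f "status")

-- ===== PORT A =====
-- the for-loop with three appending accumulators, as a foldl over the same state
def summarize_evaluated_findings (findings : List (List (String × String))) : List String × List String × List String :=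
  findings.foldl
    (fun acc f =>
      let line := pvLine f
      let st := pvStatus f
      if st = "confirmed" then (acc.1 ++ [line], acc.2.1, acc.2.2)
      else if st = "contradicted" then (acc.1, acc.2.1 ++ [line], acc.2.2)
      else (acc.1, acc.2.1, acc.2.2 ++ [line]))
    ([], [], [])

-- ===== PORT B =====
-- map once to (status, line), then three independent filters
def summarize_evaluated_findings_alt (findings : List (List (String × String))) : List String × List String × List String :=
  let tagged := findings.map (fun f => (pvStatus f, pvLine f))
  ((tagged.filter (fun p => p.1 == "confirmed")).map Prod.snd,
   (tagged.filter (fun p => p.1 == "contradicted")).map Prod.snd,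
   (tagged.filter (fun p => p.1 != "confirmed" && p.1 != "contradicted")).map Prod.snd)

-- ===== PRECONDITION & SPEC =====
def Spec_summarize_evaluated_findings (findings : List (List (String × String))) (out : List String × List String × List String) : Prop := out = summarize_evaluated_findings_alt findings
instance (findings : List (List (String × String))) (out : List String × List String × List String) : Decidable (Spec_summarize_evaluated_findings findings out) := by unfold Spec_summarize_evaluated_findings; infer_instance

-- ===== CLAIM (what is proved, stated in full; the proofs are below) =====
def Claim_equal_summarize_evaluated_findings : Prop := ∀ (findings : List (List (String × String))), Dom_summarize_evaluated_findings findings → Spec_summarize_evaluated_findings findings (summarize_evaluated_findings findings)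

-- ===== LEMMAS AND PROOFS =====

-- loop invariant: folding the rest onto accumulators (c, k, n) appends B's three filters
theorem pv_fold_append (fs : List (List (String × String))) :
    ∀ (c k n : List String),
      fs.foldl
        (fun acc f =>
          let line := pvLine f
          let st := pvStatus f
          if st = "confirmed" then (acc.1 ++ [line], acc.2.1, acc.2.2)
          else if st = "contradicted" then (acc.1, acc.2.1 ++ [line], acc.2.2)
          else (acc.1, acc.2.1, acc.2.2 ++ [line]))
        (c, k, n)
      = (c ++ ((fs.map (fun f => (pvStatus f, pvLine f))).filter (fun p => p.1 == "confirmed")).map Prod.snd,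
         k ++ ((fs.map (fun f => (pvStatus f, pvLine f))).filter (fun p => p.1 == "contradicted")).map Prod.snd,
         n ++ ((fs.map (fun f => (pvStatus f, pvLine f))).filter (fun p => p.1 != "confirmed" && p.1 != "contradicted")).map Prod.snd) := by
  induction fs with
  | nil => intro c k n; simp
  | cons f fs ih =>
    intro c k n
    by_cases h1 : pvStatus f = "confirmed"
    · simp [List.foldl_cons, h1, ih]
    · by_cases h2 : pvStatus f = "contradicted"
      · simp [List.foldl_cons, h2, ih]
      · simp [List.foldl_cons, h1, h2, ih]

-- ===== VERDICT (by name: the statement is the Claim_ definition above) =====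
theorem summarize_evaluated_findings_spec : Claim_equal_summarize_evaluated_findings := by
  intro findings _
  unfold Spec_summarize_evaluated_findings summarize_evaluated_findings summarize_evaluated_findings_alt
  simpa using pv_fold_append findings [] [] []
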